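-- pv_equiv track=rewrite | github.com/btoneil2021/phase_ten | phases.py | _can_form_run_with_wilds
-- ===== SOURCE A (Python) =====
-- from typing import List, Set, Dict, Tuple, Optional
--
-- def _can_form_run_with_wilds(sorted_ranks: List[int], wild_count: int, target_length: int) -> bool:
--     if len(sorted_ranks) + wild_count != target_length:
--         return False
--
--     if not sorted_ranks:
--         return False
--
--     # Try to place the run starting from each possible position
--     for start in range(1, 13 - target_length + 1):
--         needed_wilds = 0
--         rank_index = 0
--
--         for pos in range(start, start + target_length):
--             if rank_index < len(sorted_ranks) and sorted_ranks[rank_index] == pos: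
--                 rank_index += 1
--             else:
--                 needed_wilds += 1
--
--         if needed_wilds <= wild_count and rank_index == len(sorted_ranks):
--             return True
--
--     return False
-- ===== SOURCE B (Python) =====
-- def _can_form_run_with_wilds(sorted_ranks, wild_count, target_length):
--     if len(sorted_ranks) + wild_count != target_length:
--         return False
--     if not sorted_ranks:
--         return False
--     # run is possible iff ranks are strictly increasing and some legal window covers them
--     if any(a >= b for a, b in zip(sorted_ranks, sorted_ranks[1:])):
--         return False
--     lo, hi = sorted_ranks[0], sorted_ranks[-1]
--     return max(1, hi - target_length + 1) <= min(lo, 13 - target_length)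
-- ===== Notes on version B (the rewrite author's own statement) =====
-- stated objective: simpler
-- what changed: Replaces A's scan over all candidate start positions (each with an inner greedy walk over the window) by a single strict-monotonicity check plus a closed-form window-overlap inequality on the first and last rank.
import Mathlib
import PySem

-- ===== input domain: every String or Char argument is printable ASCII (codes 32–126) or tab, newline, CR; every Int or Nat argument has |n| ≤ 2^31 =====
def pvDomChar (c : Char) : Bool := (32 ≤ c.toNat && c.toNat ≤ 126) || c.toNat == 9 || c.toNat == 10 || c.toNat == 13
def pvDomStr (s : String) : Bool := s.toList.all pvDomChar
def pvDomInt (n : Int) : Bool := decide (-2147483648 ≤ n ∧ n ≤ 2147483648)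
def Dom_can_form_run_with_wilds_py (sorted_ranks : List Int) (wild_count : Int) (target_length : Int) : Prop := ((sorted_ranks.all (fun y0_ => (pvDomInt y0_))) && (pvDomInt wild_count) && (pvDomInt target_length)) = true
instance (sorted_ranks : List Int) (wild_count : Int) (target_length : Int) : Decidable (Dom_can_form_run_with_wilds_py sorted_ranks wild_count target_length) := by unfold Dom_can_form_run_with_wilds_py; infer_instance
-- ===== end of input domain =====

-- B replaces A's scan over every start position by one monotonicity pass and a closed-form
-- window-overlap inequality (objective: simpler).

-- ===== PORT A =====
-- inner loop body: one 'pos' step updating (needed_wilds, rank_index)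
def pvAStep (sorted_ranks : List Int) (st : Int × Int) (pos : Int) : Int × Int :=
  if st.2 < (sorted_ranks.length : Int) ∧ PySem.List.pyGetD sorted_ranks st.2 0 = pos
  then (st.1, st.2 + 1) else (st.1 + 1, st.2)

-- outer loop with early return True
def pvALoop (sorted_ranks : List Int) (wild_count target_length : Int) : List Int → Bool
  | [] => false
  | start :: rest =>
    let st := (PySem.List.pyRange start (start + target_length) 1).foldl (pvAStep sorted_ranks) (0, 0)
    if st.1 ≤ wild_count ∧ st.2 = (sorted_ranks.length : Int) then true
    else pvALoop sorted_ranks wild_count target_length rest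

def can_form_run_with_wilds_py (sorted_ranks : List Int) (wild_count : Int) (target_length : Int) : Bool :=
  if (sorted_ranks.length : Int) + wild_count ≠ target_length then false
  else if sorted_ranks.isEmpty then false
  else pvALoop sorted_ranks wild_count target_length (PySem.List.pyRange 1 (13 - target_length + 1) 1)

-- ===== PORT B =====
def can_form_run_with_wilds_py_alt (sorted_ranks : List Int) (wild_count : Int) (target_length : Int) : Bool :=
  if (sorted_ranks.length : Int) + wild_count ≠ target_length then false
  else if sorted_ranks.isEmpty then false
  else if (sorted_ranks.zip sorted_ranks.tail).any (fun p => p.2 ≤ p.1) then false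
  else
    let lo := PySem.List.pyGetD sorted_ranks 0 0
    let hi := PySem.List.pyGetD sorted_ranks (-1) 0
    decide (max 1 (hi - target_length + 1) ≤ min lo (13 - target_length))

-- ===== PRECONDITION & SPEC =====
def Spec_can_form_run_with_wilds_py (sorted_ranks : List Int) (wild_count : Int) (target_length : Int) (out : Bool) : Prop := out = can_form_run_with_wilds_py_alt sorted_ranks wild_count target_length
instance (sorted_ranks : List Int) (wild_count : Int) (target_length : Int) (out : Bool) : Decidable (Spec_can_form_run_with_wilds_py sorted_ranks wild_count target_length out) := by unfold Spec_can_form_run_with_wilds_py; infer_instance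

-- ===== CLAIM (what is proved, stated in full; the proofs are below) =====
def Claim_equal_can_form_run_with_wilds_py : Prop := ∀ (sorted_ranks : List Int) (wild_count : Int) (target_length : Int), Dom_can_form_run_with_wilds_py sorted_ranks wild_count target_length → Spec_can_form_run_with_wilds_py sorted_ranks wild_count target_length (can_form_run_with_wilds_py sorted_ranks wild_count target_length)

-- ===== LEMMAS AND PROOFS =====

-- length of the maximal prefix the greedy inner walk of A matches against positions s, s+1, …, e-1
def pvMatchLen : List Int → Int → Int → Nat
  | [], _, _ => 0
  | a :: rest, s, e => if s ≤ a ∧ a < e then pvMatchLen rest (a + 1) e + 1 else 0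

lemma pvMatchLen_of_ge (l : List Int) (s e : Int) (h : e ≤ s) : pvMatchLen l s e = 0 := by
  cases l with
  | nil => rfl
  | cons a rest =>
    simp only [pvMatchLen]
    rw [if_neg (by omega)]

lemma pvMatchLen_shift (l : List Int) (s e : Int) (h : l.head? ≠ some s) :
    pvMatchLen l s e = pvMatchLen l (s + 1) e := by
  cases l with
  | nil => rfl
  | cons a rest =>
    simp only [List.head?_cons, ne_eq, Option.some.injEq] at h
    simp only [pvMatchLen]
    have : (s ≤ a ∧ a < e) ↔ (s + 1 ≤ a ∧ a < e) := by omega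
    rw [if_congr this rfl rfl]

lemma pvMatchLen_pos_lt (l : List Int) (s e : Int) (h : 0 < pvMatchLen l s e) : s < e := by
  cases l with
  | nil => simp [pvMatchLen] at h
  | cons a rest =>
    by_cases hc : s ≤ a ∧ a < e
    · omega
    · simp only [pvMatchLen, if_neg hc] at h
      omega

-- full greedy match ⟺ strictly increasing and contained in [s, e)
lemma pvMatchLen_full (l : List Int) : ∀ s e : Int,
    pvMatchLen l s e = l.length ↔ (List.Pairwise (· < ·) l ∧ ∀ x ∈ l, s ≤ x ∧ x < e) := by
  induction l with
  | nil => intro s e; simp [pvMatchLen]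
  | cons a rest ih =>
    intro s e
    simp only [pvMatchLen, List.length_cons, List.pairwise_cons, List.forall_mem_cons]
    split_ifs with h
    · rw [Nat.add_right_cancel_iff, ih (a + 1) e]
      constructor
      · rintro ⟨hp, hb⟩
        refine ⟨⟨fun x hx => by have := (hb x hx).1; omega, hp⟩, ⟨h, fun x hx => ⟨by have := (hb x hx).1; omega, (hb x hx).2⟩⟩⟩
      · rintro ⟨⟨hlt, hp⟩, _, hb⟩
        exact ⟨hp, fun x hx => ⟨by have := hlt x hx; omega, (hb x hx).2⟩⟩
    · constructor
      · intro h0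
        exact h0.elim
      · rintro ⟨_, ha, _⟩; exact absurd ha h

-- the inner fold of A computes pvMatchLen
lemma pvAfold (l : List Int) (e : Int) : ∀ (s : Int) (n : Int) (i : Nat), i ≤ l.length →
    (PySem.List.pyRange s e 1).foldl (pvAStep l) (n, (i : Int)) =
      (n + ((PySem.List.pyRange s e 1).length : Int) - (pvMatchLen (l.drop i) s e : Int),
       (i : Int) + (pvMatchLen (l.drop i) s e : Int)) := by
  intro s
  by_cases hse : s < e
  · have hlt : (e - (s + 1)).toNat < (e - s).toNat := by omega
    intro n i hi
    rw [PySem.List.pyRange_one_cons hse]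
    simp only [List.foldl_cons, List.length_cons]
    by_cases hm : (i : Int) < (l.length : Int) ∧ PySem.List.pyGetD l (i : Int) 0 = s
    · -- match: element i equals s
      have hilen : i < l.length := by exact_mod_cast hm.1
      have hget : PySem.List.pyGetD l (i : Int) 0 = l[i] := by
        rw [PySem.List.pyGetD_natCast]; simp [List.getD, hilen]
      have hdrop : l.drop i = l[i] :: l.drop (i + 1) := by
        exact (List.drop_eq_getElem_cons hilen)
      have hstep : pvAStep l (n, (i : Int)) s = (n, ((i + 1 : Nat) : Int)) := by
        simp only [pvAStep]
        rw [if_pos hm, Prod.mk.injEq]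
        exact ⟨rfl, by push_cast; ring⟩
      rw [hstep, pvAfold l e (s + 1) n (i + 1) (by omega)]
      have hml : pvMatchLen (l.drop i) s e = pvMatchLen (l.drop (i + 1)) (s + 1) e + 1 := by
        rw [hdrop]
        simp only [pvMatchLen]
        rw [if_pos ⟨by rw [hget] at hm; omega, by rw [hget] at hm; have := hm.2; subst this; exact hse⟩]
        rw [hget] at hm; rw [hm.2]
      rw [hml, Prod.mk.injEq]
      exact ⟨by push_cast; ring, by push_cast; ring⟩
    · -- no match at this position
      have hstep : pvAStep l (n, (i : Int)) s = (n + 1, (i : Int)) := by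
        simp only [pvAStep, hm, if_neg, not_false_iff]
      rw [hstep, pvAfold l e (s + 1) (n + 1) i hi]
      have hml : pvMatchLen (l.drop i) s e = pvMatchLen (l.drop i) (s + 1) e := by
        apply pvMatchLen_shift
        intro hh
        apply hm
        rcases i.lt_or_ge l.length with hilen | hilen
        · have : (l.drop i).head? = some l[i] := by
            rw [List.drop_eq_getElem_cons hilen]; rfl
          rw [this] at hh
          refine ⟨by exact_mod_cast hilen, ?_⟩
          rw [PySem.List.pyGetD_natCast]
          simp only [List.getD, List.getElem?_eq_getElem hilen]
          simpa using hh
        · rw [List.drop_eq_nil_of_le hilen] at hh; simp at hh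
      rw [hml, Prod.mk.injEq]
      exact ⟨by push_cast; ring, by ring⟩
  · intro n i hi
    have h1 : PySem.List.pyRange s e 1 = [] := by
      rw [PySem.List.pyRange_one]
      have : (e - s).toNat = 0 := by omega
      simp [this]
    rw [h1, pvMatchLen_of_ge _ _ _ (by omega)]
    simp
termination_by s => (e - s).toNat

-- the outer loop is an 'any' over start positions
lemma pvALoop_eq_any (l : List Int) (w t : Int) (starts : List Int) :
    pvALoop l w t starts = starts.any (fun start =>
      let st := (PySem.List.pyRange start (start + t) 1).foldl (pvAStep l) (0, 0)
      decide (st.1 ≤ w ∧ st.2 = (l.length : Int))) := by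
  induction starts with
  | nil => rfl
  | cons a rest ih =>
    simp only [pvALoop, List.any_cons, ih]
    split_ifs with h
    · simp [h]
    · simp [h]

-- every element of a strictly sorted nonempty list is ≤ its last element
lemma pvLe_getLastD (l : List Int) (hne : l ≠ []) (hp : List.Pairwise (· < ·) l) :
    ∀ x ∈ l, x ≤ l.getLastD 0 := by
  induction l with
  | nil => simp at hne
  | cons a rest ih =>
    intro x hx
    cases rest with
    | nil => simp at hx; simp [hx]
    | cons b rest' =>
      have hlast : (a :: b :: rest').getLastD 0 = (b :: rest').getLastD 0 := by
        simp [List.getLastD]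
      rw [hlast]
      rcases List.mem_cons.mp hx with rfl | hx'
      · have hmem : (b :: rest').getLastD 0 ∈ b :: rest' := by
          have := List.getLast_mem (l := b :: rest') (by simp)
          rwa [List.getLastD_eq_getLast?,
            List.getLast?_eq_some_getLast (l := b :: rest') (by simp), Option.getD_some]
        have := (List.pairwise_cons.mp hp).1 _ hmem
        omega
      · exact ih (by simp) (List.pairwise_cons.mp hp).2 x hx'

-- bounds on all elements ⟺ bounds on first and last (strictly sorted, nonempty)
lemma pvBounds (l : List Int) (hne : l ≠ []) (hp : List.Pairwise (· < ·) l) (s e : Int) :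
    (∀ x ∈ l, s ≤ x ∧ x < e) ↔ (s ≤ l.headD 0 ∧ l.getLastD 0 < e) := by
  constructor
  · intro h
    have hh : l.headD 0 ∈ l := by cases l with | nil => simp at hne | cons a r => simp
    have hl : l.getLastD 0 ∈ l := by
      cases l with
      | nil => simp at hne
      | cons a r =>
        have := List.getLast_mem (l := a :: r) (by simp)
        rwa [List.getLastD_eq_getLast?,
          List.getLast?_eq_some_getLast (l := a :: r) (by simp), Option.getD_some]
    exact ⟨(h _ hh).1, (h _ hl).2⟩
  · rintro ⟨hs, he⟩ x hx
    have hle := pvLe_getLastD l hne hp x hx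
    have hge : l.headD 0 ≤ x := by
      cases l with
      | nil => simp at hne
      | cons a r =>
        rcases List.mem_cons.mp hx with rfl | hx'
        · simp
        · have := (List.pairwise_cons.mp hp).1 x hx'
          simp only [List.headD_cons]; omega
    omega

-- adjacent-pair check ⟺ strictly sorted
lemma pvZipAny (l : List Int) :
    ((l.zip l.tail).any (fun p => decide (p.2 ≤ p.1)) = false) ↔ List.Pairwise (· < ·) l := by
  induction l with
  | nil => simp
  | cons a rest ih =>
    cases rest with
    | nil => simp
    | cons b rest' =>
      simp only [List.tail_cons, List.zip_cons_cons, List.any_cons, Bool.or_eq_false_iff,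
        decide_eq_false_iff_not, not_le] at ih ⊢
      rw [List.pairwise_cons]
      constructor
      · rintro ⟨hab, hrest⟩
        have hp := ih.mp hrest
        refine ⟨?_, hp⟩
        intro x hx
        rcases List.mem_cons.mp hx with rfl | hx'
        · exact hab
        · have := (List.pairwise_cons.mp hp).1 x hx'
          omega
      · rintro ⟨hall, hp⟩
        exact ⟨hall b (by simp), ih.mpr hp⟩

-- ===== VERDICT (by name: the statement is the Claim_ definition above) =====
theorem can_form_run_with_wilds_py_spec : Claim_equal_can_form_run_with_wilds_py := by
  intro l w t _
  unfold Spec_can_form_run_with_wilds_py can_form_run_with_wilds_py can_form_run_with_wilds_py_alt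
  by_cases hlen : (l.length : Int) + w ≠ t
  · simp [hlen]
  · rw [if_neg hlen, if_neg hlen]
    by_cases hemp : l.isEmpty
    · simp [hemp]
    · rw [if_neg hemp, if_neg hemp]
      have hne : l ≠ [] := by simpa [List.isEmpty_iff] using hemp
      have hlen1 : 1 ≤ l.length := by
        cases l with | nil => exact absurd rfl hne | cons a r => simp
      rw [Ne, not_not] at hlen
      rw [pvALoop_eq_any]
      rw [Bool.eq_iff_iff, List.any_eq_true]
      constructor
      · rintro ⟨start, hmem, hcond⟩
        rw [decide_eq_true_iff] at hcond
        rw [show ((0,0) : Int × Int) = ((0 : Int), ((0 : Nat) : Int)) from rfl,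
          pvAfold l (start + t) start 0 0 (by omega)] at hcond
        simp only [List.drop_zero] at hcond
        have hm : pvMatchLen l start (start + t) = l.length := by
          have := hcond.2; omega
        have hfull := (pvMatchLen_full l start (start + t)).mp hm
        rcases hfull with ⟨hp, hb⟩
        rw [if_neg (by simp [pvZipAny l |>.mpr hp])]
        rw [PySem.List.mem_pyRange_one] at hmem
        have hbnd := (pvBounds l hne hp start (start + t)).mp hb
        have hlo : PySem.List.pyGetD l 0 0 = l.headD 0 := by
          rw [PySem.List.pyGetD_zero]; cases l with | nil => rfl | cons a r => rfl
        have hhi : PySem.List.pyGetD l (-1) 0 = l.getLastD 0 := by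
          rw [PySem.List.pyGetD_neg_one l 0 hne, List.getLastD_eq_getLast?,
            List.getLast?_eq_some_getLast (l := l) hne, Option.getD_some]
        rw [hlo, hhi, decide_eq_true_iff]
        omega
      · intro hB
        by_cases hz : (l.zip l.tail).any (fun p => decide (p.2 ≤ p.1)) = true
        · rw [if_pos hz] at hB; exact absurd hB (by simp)
        · rw [if_neg hz] at hB
          have hp := (pvZipAny l).mp (by simpa using hz)
          rw [decide_eq_true_iff] at hB
          have hlo : PySem.List.pyGetD l 0 0 = l.headD 0 := by
            rw [PySem.List.pyGetD_zero]; cases l with | nil => rfl | cons a r => rfl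
          have hhi : PySem.List.pyGetD l (-1) 0 = l.getLastD 0 := by
            rw [PySem.List.pyGetD_neg_one l 0 hne, List.getLastD_eq_getLast?,
              List.getLast?_eq_some_getLast (l := l) hne, Option.getD_some]
          rw [hlo, hhi] at hB
          -- choose the start position
          refine ⟨max 1 (l.getLastD 0 - t + 1), ?_, ?_⟩
          · rw [PySem.List.mem_pyRange_one]; omega
          · set start := max 1 (l.getLastD 0 - t + 1) with hstart
            have hb : ∀ x ∈ l, start ≤ x ∧ x < start + t := by
              rw [pvBounds l hne hp]; omega
            have hm : pvMatchLen l start (start + t) = l.length :=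
              (pvMatchLen_full l start (start + t)).mpr ⟨hp, hb⟩
            rw [decide_eq_true_iff,
              show ((0,0) : Int × Int) = ((0 : Int), ((0 : Nat) : Int)) from rfl,
              pvAfold l (start + t) start 0 0 (by omega)]
            simp only [List.drop_zero, hm]
            have ht1 : 0 < t := by
              have : 0 < pvMatchLen l start (start + t) := by omega
              have := pvMatchLen_pos_lt l start (start + t) this
              omega
            rw [PySem.List.length_pyRange_one]
            constructor <;> omega
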